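-- pv_equiv track=rewrite | github.com/Punpuf/hsk-syllabus-vocabulary-parser | src/hsk_pipeline/stages/stage2_number.py | _tokenize_pinyin
-- ===== SOURCE A (Python) =====
-- SEPARATOR_CHARS = set("-/'’·•")
--
-- PRESERVE_SEPARATORS = {"/"}
--
-- def _tokenize_pinyin(pinyin: str) -> list[tuple[str, bool]]:
--     """Split pinyin into token/separator pairs.
--
--     Args:
--         pinyin: Raw pinyin string.
--
--     Returns:
--         List of ``(token, is_separator)`` where slash separators are preserved
--         and other separators/whitespace become boundaries.
--     """
--
--     tokens: list[tuple[str, bool]] = []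
--     buf: list[str] = []
--
--     def flush_buffer() -> None:
--         if buf:
--             tokens.append(("".join(buf), False))
--             buf.clear()
--
--     for ch in pinyin:
--         if ch.isspace() or ch in SEPARATOR_CHARS:
--             flush_buffer()
--             if ch in PRESERVE_SEPARATORS:
--                 tokens.append((ch, True))
--             continue
--         buf.append(ch)
--
--     flush_buffer()
--     return tokens
-- ===== SOURCE B (Python) =====
-- SEPARATOR_CHARS = set("-/'’·•")
--
-- PRESERVE_SEPARATORS = {"/"}
--
--
-- def _tokenize_pinyin(pinyin: str) -> list[tuple[str, bool]]:
--     """Split pinyin into token/separator pairs (two-pointer span scanner)."""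
--     tokens: list[tuple[str, bool]] = []
--     i, n = 0, len(pinyin)
--     while i < n:
--         ch = pinyin[i]
--         if ch.isspace() or ch in SEPARATOR_CHARS:
--             if ch in PRESERVE_SEPARATORS:
--                 tokens.append((ch, True))
--             i += 1
--         else:
--             j = i + 1
--             while j < n and not (pinyin[j].isspace() or pinyin[j] in SEPARATOR_CHARS):
--                 j += 1
--             tokens.append((pinyin[i:j], False))
--             i = j
--     return tokens
-- ===== Notes on version B (the rewrite author's own statement) =====
-- stated objective: alternative
-- what changed: Replaces the char-by-char fold with a growing buffer and flush helper by an index-based two-pointer scanner that slices each maximal non-separator run out of the string in one step.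
import Mathlib
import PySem

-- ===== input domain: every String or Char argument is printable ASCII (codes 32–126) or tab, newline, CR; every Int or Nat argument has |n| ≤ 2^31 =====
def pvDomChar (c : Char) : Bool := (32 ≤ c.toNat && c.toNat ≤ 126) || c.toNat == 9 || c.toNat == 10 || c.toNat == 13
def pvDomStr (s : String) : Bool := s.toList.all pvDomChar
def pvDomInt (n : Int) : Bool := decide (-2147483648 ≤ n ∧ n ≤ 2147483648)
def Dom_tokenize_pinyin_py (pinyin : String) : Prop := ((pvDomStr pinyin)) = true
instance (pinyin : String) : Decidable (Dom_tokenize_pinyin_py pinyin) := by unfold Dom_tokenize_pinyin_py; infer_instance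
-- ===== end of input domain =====

-- B replaces A's char-by-char fold with a buffer and flush helper by a two-pointer
-- scanner that slices each maximal non-separator run out of the string in one step
-- (objective: alternative; same value on every input).

-- ===== PORT A =====
-- ch.isspace() or ch in SEPARATOR_CHARS  (SEPARATOR_CHARS = set("-/'’·•"))
def pvIsSep (c : Char) : Bool :=
  PySem.Chars.isspace c || (c == '-' || c == '/' || c == '\'' || c == '’' || c == '·' || c == '•')

-- flush_buffer: if buf: tokens.append(("".join(buf), False)); buf.clear()
def pvFlush (st : List (String × Bool) × List Char) : List (String × Bool) × List Char :=
  if st.2 = [] then st else (st.1 ++ [(String.ofList st.2, false)], [])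

-- one iteration of A's 'for ch in pinyin' loop over the state (tokens, buf)
def pvStepA (st : List (String × Bool) × List Char) (c : Char) : List (String × Bool) × List Char :=
  if pvIsSep c then
    let st' := pvFlush st
    if c = '/' then (st'.1 ++ [("/", true)], st'.2) else st'
  else (st.1, st.2 ++ [c])

def tokenize_pinyin_py (pinyin : String) : List (String × Bool) :=
  (pvFlush (pinyin.toList.foldl pvStepA ([], []))).1

-- ===== PORT B =====
-- B's outer while loop over the cursor i; the inner while loop that advances j to the
-- end of the maximal non-separator run is takeWhile/dropWhile on the tail, and the
-- slice pinyin[i:j] is (c :: run).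
def pvScanB : List Char → List (String × Bool)
  | [] => []
  | c :: cs =>
    if pvIsSep c then
      if c = '/' then ("/", true) :: pvScanB cs else pvScanB cs
    else
      (String.ofList (c :: cs.takeWhile (fun d => !pvIsSep d)), false)
        :: pvScanB (cs.dropWhile (fun d => !pvIsSep d))
  termination_by cs => cs.length
  decreasing_by
    · simp
    · simp
    · exact Nat.lt_succ_of_le (List.length_dropWhile_le _ _)

def tokenize_pinyin_py_alt (pinyin : String) : List (String × Bool) :=
  pvScanB pinyin.toList

-- ===== PRECONDITION & SPEC =====
def Spec_tokenize_pinyin_py (pinyin : String) (out : List (String × Bool)) : Prop := out = tokenize_pinyin_py_alt pinyin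
instance (pinyin : String) (out : List (String × Bool)) : Decidable (Spec_tokenize_pinyin_py pinyin out) := by unfold Spec_tokenize_pinyin_py; infer_instance

-- ===== CLAIM (what is proved, stated in full; the proofs are below) =====
def Claim_equal_tokenize_pinyin_py : Prop := ∀ (pinyin : String), Dom_tokenize_pinyin_py pinyin → Spec_tokenize_pinyin_py pinyin (tokenize_pinyin_py pinyin)

-- ===== LEMMAS AND PROOFS =====

-- A's loop started with pending buffer buf on remaining input cs, flushed at the end.
def pvRunA (buf : List Char) (cs : List Char) : List (String × Bool) :=
  (pvFlush (cs.foldl pvStepA ([], buf))).1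

lemma pvStepA_shift (tokens : List (String × Bool)) (buf : List Char) (c : Char) :
    pvStepA (tokens, buf) c = (tokens ++ (pvStepA ([], buf) c).1, (pvStepA ([], buf) c).2) := by
  unfold pvStepA pvFlush
  split_ifs <;> simp_all

lemma pvFoldA_shift (cs : List Char) : ∀ (tokens : List (String × Bool)) (buf : List Char),
    List.foldl pvStepA (tokens, buf) cs
      = (tokens ++ (List.foldl pvStepA ([], buf) cs).1, (List.foldl pvStepA ([], buf) cs).2) := by
  induction cs with
  | nil => intro tokens buf; simp
  | cons c cs ih =>
    intro tokens buf
    rw [List.foldl_cons, List.foldl_cons, pvStepA_shift tokens buf c, ih]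
    conv_rhs => rw [ih]
    simp

lemma pvFlush_shift (tokens t : List (String × Bool)) (b : List Char) :
    (pvFlush (tokens ++ t, b)).1 = tokens ++ (pvFlush (t, b)).1 := by
  unfold pvFlush; split_ifs <;> simp

lemma pvFoldA_tokens (cs : List Char) (tokens : List (String × Bool)) (buf : List Char) :
    (pvFlush (cs.foldl pvStepA (tokens, buf))).1 = tokens ++ pvRunA buf cs := by
  rw [pvFoldA_shift, pvFlush_shift]; rfl

lemma pvRunA_cons (buf : List Char) (c : Char) (cs : List Char) :
    pvRunA buf (c :: cs) = (pvStepA ([], buf) c).1 ++ pvRunA (pvStepA ([], buf) c).2 cs := by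
  unfold pvRunA
  rw [List.foldl_cons]
  rcases hp : pvStepA ([], buf) c with ⟨t0, b0⟩
  simpa using pvFoldA_tokens cs t0 b0

-- The invariant relating A's buffered loop to B's run scanner.
lemma pvScan_eq : ∀ (n : ℕ) (cs : List Char), cs.length ≤ n →
    (pvRunA [] cs = pvScanB cs) ∧
    (∀ buf : List Char, buf ≠ [] → pvRunA buf cs =
      (String.ofList (buf ++ cs.takeWhile (fun d => !pvIsSep d)), false)
        :: pvScanB (cs.dropWhile (fun d => !pvIsSep d))) := by
  intro n
  induction n with
  | zero =>
    intro cs h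
    have hcs : cs = [] := List.eq_nil_of_length_eq_zero (Nat.le_zero.mp h)
    subst hcs
    refine ⟨by simp [pvRunA, pvFlush, pvScanB], ?_⟩
    intro buf hb
    simp [pvRunA, pvFlush, pvScanB, hb]
  | succ n ihn =>
    intro cs h
    cases cs with
    | nil =>
      refine ⟨by simp [pvRunA, pvFlush, pvScanB], ?_⟩
      intro buf hb
      simp [pvRunA, pvFlush, pvScanB, hb]
    | cons c cs =>
      have hlen : cs.length ≤ n := Nat.succ_le_succ_iff.mp (by simpa using h)
      have IH := ihn cs hlen
      constructor
      · rw [pvRunA_cons]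
        by_cases hs : pvIsSep c = true
        · by_cases hc : c = '/'
          · subst hc
            simp only [pvStepA, pvFlush, hs, if_true]
            simp [pvScanB, hs, IH.1]
          · simp only [pvStepA, pvFlush, hs, if_true, if_neg hc]
            simp [pvScanB, hs, hc, IH.1]
        · have h2 := IH.2 [c] (by simp)
          simp only [pvStepA, hs, Bool.false_eq_true, if_false, List.nil_append]
          rw [h2]
          simp [pvScanB, hs]
      · intro buf hb
        rw [pvRunA_cons]
        by_cases hs : pvIsSep c = true
        · have htk : (c :: cs).takeWhile (fun d => !pvIsSep d) = [] :=
            List.takeWhile_cons_of_neg (by simp [hs])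
          have hdr : (c :: cs).dropWhile (fun d => !pvIsSep d) = c :: cs :=
            List.dropWhile_cons_of_neg (by simp [hs])
          by_cases hc : c = '/'
          · subst hc
            simp only [pvStepA, pvFlush, hs, if_true, hb, if_neg hb]
            simp [htk, hdr, pvScanB, hs, IH.1]
          · simp only [pvStepA, pvFlush, hs, if_true, if_neg hc, hb, if_neg hb]
            simp [htk, hdr, pvScanB, hs, hc, IH.1]
        · have h2 := IH.2 (buf ++ [c]) (by simp)
          have hs' : (!pvIsSep c) = true := by simp [hs]
          simp only [pvStepA, hs, Bool.false_eq_true, if_false, List.nil_append]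
          rw [h2]
          simp [List.takeWhile_cons, List.dropWhile_cons, hs]

-- ===== VERDICT (by name: the statement is the Claim_ definition above) =====
theorem tokenize_pinyin_py_spec : Claim_equal_tokenize_pinyin_py := by
  intro p _
  unfold Spec_tokenize_pinyin_py tokenize_pinyin_py tokenize_pinyin_py_alt
  rw [pvFoldA_tokens p.toList [] []]
  simpa using (pvScan_eq p.toList.length p.toList le_rfl).1
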